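-- pv_equiv track=rewrite | github.com/tongosu/ddonilang | tests/run_pack_golden.py | extract_last_state_hash
-- ===== SOURCE A (Python) =====
-- def extract_last_state_hash(lines: list[str]) -> str | None:
--     for raw in reversed(lines):
--         line = raw.strip()
--         if not line.startswith("state_hash="):
--             continue
--         value = line.split("=", 1)[1].strip().split()[0]
--         if value:
--             return value
--     return None
-- ===== SOURCE B (Python) =====
-- def extract_last_state_hash(lines: list[str]) -> str | None:
--     result = None
--     for raw in lines:
--         line = raw.strip()
--         if not line.startswith("state_hash="):
--             continue
--         words = line.split("=", 1)[1].strip().split()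
--         value = words[0] if words else ""
--         if value:
--             result = value
--     return result
-- ===== Notes on version B (the rewrite author's own statement) =====
-- stated objective: alternative
-- what changed: Replaced A's reverse scan with early return on the first match by a single forward fold that keeps overwriting a running result with the latest valid state_hash value.
import Mathlib
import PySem

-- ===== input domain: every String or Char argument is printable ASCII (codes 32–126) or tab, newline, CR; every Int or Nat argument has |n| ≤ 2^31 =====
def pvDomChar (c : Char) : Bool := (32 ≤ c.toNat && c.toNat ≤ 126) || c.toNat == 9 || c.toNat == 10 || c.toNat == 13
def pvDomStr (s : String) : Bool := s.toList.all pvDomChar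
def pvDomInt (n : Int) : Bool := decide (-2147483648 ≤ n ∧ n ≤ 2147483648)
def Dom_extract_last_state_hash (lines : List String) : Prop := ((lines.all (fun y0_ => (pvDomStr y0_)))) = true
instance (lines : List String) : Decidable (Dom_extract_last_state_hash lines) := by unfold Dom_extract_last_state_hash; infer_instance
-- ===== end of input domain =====

-- B replaces A's reverse scan with early return by a single forward fold that remembers the
-- last valid value (objective: alternative decomposition; same O(n) cost; return value only).

-- ===== PORT A =====
-- reverse scan, first match wins (literal port of A)
def extract_last_state_hash_go : List String → Option String
  | [] => none
  | raw :: rest =>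
    let line := PySem.Str.strip raw
    if PySem.Str.startswith line "state_hash=" then
      match PySem.List.pyGet? ((PySem.Str.splitMax? line "=" 1).getD []) 1 with
      | none => none          -- IndexError (unreachable: line contains '=')
      | some rhs =>
        match PySem.List.pyGet? (PySem.Str.split₀ (PySem.Str.strip rhs)) 0 with
        | none => none        -- Python raises IndexError here; excluded by Pre_
        | some value => if value ≠ "" then some value else extract_last_state_hash_go rest
    else extract_last_state_hash_go rest

def extract_last_state_hash (lines : List String) : Option String :=
  extract_last_state_hash_go lines.reverse

-- ===== PORT B =====
def extract_last_state_hash_alt_step (result : Option String) (raw : String) : Option String :=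
  let line := PySem.Str.strip raw
  if PySem.Str.startswith line "state_hash=" then
    let words := PySem.Str.split₀ (PySem.Str.strip (((PySem.Str.splitMax? line "=" 1).getD []).getD 1 ""))
    let value := words.headD ""
    if value ≠ "" then some value else result
  else result

def extract_last_state_hash_alt (lines : List String) : Option String :=
  lines.foldl extract_last_state_hash_alt_step none

-- ===== PRECONDITION & SPEC =====
-- helpers for Pre_/Raises_ (independent of both ports)
def pvIsHashLine (raw : String) : Bool :=
  PySem.Str.startswith (PySem.Str.strip raw) "state_hash="
def pvHashWords (raw : String) : List String :=
  PySem.Str.split₀ (PySem.Str.strip (((PySem.Str.splitMax? (PySem.Str.strip raw) "=" 1).getD []).getD 1 ""))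

-- Pre_ excludes exactly the inputs where A raises IndexError: the last line starting (after
-- strip) with "state_hash=" has a whitespace-only value part, so `.split()[0]` hits an empty list.
def Pre_extract_last_state_hash (lines : List String) : Prop :=
  ((lines.filter pvIsHashLine).getLast?.all fun m => !(pvHashWords m).isEmpty) = true
instance (lines : List String) : Decidable (Pre_extract_last_state_hash lines) := by
  unfold Pre_extract_last_state_hash; infer_instance

def pvWitness_extract_last_state_hash : List String := ["state_hash=abc"]

def Spec_extract_last_state_hash (lines : List String) (out : Option String) : Prop :=
  out = extract_last_state_hash_alt lines
instance (lines : List String) (out : Option String) : Decidable (Spec_extract_last_state_hash lines out) := by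
  unfold Spec_extract_last_state_hash; infer_instance

-- ===== CLAIM (what is proved, stated in full; the proofs are below) =====
def Claim_equal_extract_last_state_hash : Prop :=
  ∀ (lines : List String), Dom_extract_last_state_hash lines →
    Pre_extract_last_state_hash lines →
    Spec_extract_last_state_hash lines (extract_last_state_hash lines)

-- ===== LEMMAS AND PROOFS =====

lemma pv_go_nonsep (p : List Char) (hp : '=' ∉ p) :
    ∀ (t cur : List Char) (accs : List (List Char)) (m fuel : Nat), m ≠ 0 →
      PySem.Chars.splitOnMax.go ['='] (p.length + fuel) m (p ++ t) cur accs =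
      PySem.Chars.splitOnMax.go ['='] fuel m t (p.reverse ++ cur) accs := by
  induction p with
  | nil => intro t cur accs m fuel hm; simp
  | cons c p ih =>
    intro t cur accs m fuel hm
    have hc : c ≠ '=' := fun h => hp (h ▸ List.mem_cons_self ..)
    have hlen : (c :: p).length + fuel = (p.length + fuel) + 1 := by simp; omega
    have hpref : List.isPrefixOf ['='] (c :: (p ++ t)) = false := by
      simp [List.isPrefixOf]; exact Ne.symm hc
    rw [hlen, List.cons_append, PySem.Chars.splitOnMax.go.eq_def]
    simp only [hpref, if_neg hm, if_false, Bool.false_eq_true]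
    rw [ih (fun h => hp (List.mem_cons_of_mem _ h)) t (c :: cur) accs m fuel hm]
    simp

lemma pv_splitOnMax_state_hash (t : List Char) :
    PySem.Chars.splitOnMax ("state_hash=".toList ++ t) "=".toList 1 =
      ["state_hash".toList, t] := by
  have h1 : ("state_hash=".toList : List Char) = "state_hash".toList ++ ['='] := by decide
  rw [PySem.Chars.splitOnMax]
  simp only [show ¬((1:Int) < 0) by decide, if_false]
  have hlen : (("state_hash=".toList ++ t).length + 1) = ("state_hash".toList).length + (t.length + 2) := by
    simp [h1]; omega
  rw [hlen, h1, List.append_assoc, show ("=".toList : List Char) = ['='] by decide, show Int.toNat 1 = 1 by decide]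
  rw [pv_go_nonsep "state_hash".toList (by decide) (['='] ++ t) [] [] 1 (t.length+2) (by decide)]
  rw [show t.length + 2 = (t.length + 1) + 1 by omega]
  rw [PySem.Chars.splitOnMax.go.eq_def]
  simp only [List.cons_append, List.nil_append]
  have : List.isPrefixOf ['='] ('=' :: t) = true := by simp [List.isPrefixOf]
  simp only [this, if_true]
  rw [if_neg (show ¬ (1:Nat) = 0 by decide)]
  cases t with
  | nil =>
    rw [PySem.Chars.splitOnMax.go.eq_def]
    decide
  | cons c r =>
    rw [show List.length (c :: r) + 1 = (r.length + 1) + 1 by simp]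
    rw [PySem.Chars.splitOnMax.go.eq_def]
    simp

lemma pv_splitMax?_state_hash (line : String)
    (h : PySem.Str.startswith line "state_hash=" = true) :
    (PySem.Str.splitMax? line "=" 1).getD [] =
      ["state_hash", String.ofList (line.toList.drop 11)] := by
  rw [PySem.Str.startswith] at h
  rw [PySem.Chars.startswith_iff] at h
  obtain ⟨t, ht⟩ := h
  have hdrop : line.toList.drop 11 = t := by
    rw [← ht]; simp
  rw [PySem.Str.splitMax?, PySem.Chars.splitMax?]
  simp only [show (("=" : String).toList.isEmpty) = false by decide, if_false, Bool.false_eq_true]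
  rw [← ht, pv_splitOnMax_state_hash t]
  simp only [show List.drop 11 ("state_hash=".toList ++ t) = t by simp]
  simp

lemma pv_split₀_go_ne_nil (s : List Char) :
    ∀ (cur : List Char) (acc : List (List Char)) (w : List Char),
      (∀ u ∈ acc, u ≠ []) → w ∈ PySem.Chars.split₀.go s cur acc → w ≠ [] := by
  induction s with
  | nil =>
    intro cur acc w hacc hw
    rw [PySem.Chars.split₀.go.eq_def] at hw
    by_cases hc : cur.isEmpty
    · simp only [hc, if_true] at hw
      exact hacc w (by simpa using hw)
    · simp only [hc, Bool.false_eq_true, if_false, List.mem_reverse, List.mem_cons] at hw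
      rcases hw with h | h
      · subst h
        simp only [ne_eq, List.reverse_eq_nil_iff]
        exact fun h2 => by simp [h2] at hc
      · exact hacc w h
  | cons c rest ih =>
    intro cur acc w hacc hw
    rw [PySem.Chars.split₀.go.eq_def] at hw
    by_cases hs : PySem.Chars.isspace c
    · simp only [hs, if_true] at hw
      by_cases hc : cur.isEmpty
      · simp only [hc, if_true] at hw
        exact ih [] acc w hacc hw
      · simp only [hc, Bool.false_eq_true, if_false] at hw
        refine ih [] _ w ?_ hw
        intro u hu
        rcases List.mem_cons.mp hu with h | h
        · subst h
          simp only [ne_eq, List.reverse_eq_nil_iff]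
          exact fun h2 => by simp [h2] at hc
        · exact hacc u h
    · simp only [hs, Bool.false_eq_true, if_false] at hw
      exact ih (c :: cur) acc w hacc hw

lemma pv_mem_split₀_ne_empty (s : String) (v : String) (hv : v ∈ PySem.Str.split₀ s) : v ≠ "" := by
  rw [PySem.Str.split₀] at hv
  rcases List.mem_map.mp hv with ⟨w, hw, rfl⟩
  have hne : w ≠ [] := pv_split₀_go_ne_nil s.toList [] [] w (by simp) hw
  intro h
  apply hne
  have := congrArg String.toList h
  simpa using this

set_option maxHeartbeats 1000000 in
lemma pv_main (lines : List String) :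
    Pre_extract_last_state_hash lines →
    extract_last_state_hash_go lines.reverse = List.foldl extract_last_state_hash_alt_step none lines := by
  induction lines using List.reverseRecOn with
  | nil => intro _; rfl
  | append_singleton ys x ih =>
    intro hpre
    rw [List.reverse_append, List.reverse_singleton, List.singleton_append,
        List.foldl_append, List.foldl_cons, List.foldl_nil]
    by_cases hm : pvIsHashLine x = true
    · have hsw : PySem.Str.startswith (PySem.Str.strip x) "state_hash=" = true := hm
      have hfil : ((ys ++ [x]).filter pvIsHashLine) = ys.filter pvIsHashLine ++ [x] := by
        rw [List.filter_append]; simp [hm]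
      have hwords : (pvHashWords x).isEmpty = false := by
        unfold Pre_extract_last_state_hash at hpre
        rw [hfil, List.getLast?_concat] at hpre
        simpa using hpre
      rw [extract_last_state_hash_go]
      rw [extract_last_state_hash_alt_step]
      simp only [hsw, if_true]
      rw [pv_splitMax?_state_hash _ hsw]
      have hpw : pvHashWords x =
          PySem.Str.split₀ (PySem.Str.strip (String.ofList ((PySem.Str.strip x).toList.drop 11))) := by
        unfold pvHashWords
        rw [pv_splitMax?_state_hash _ hsw]
        rfl
      rcases hwc : PySem.Str.split₀ (PySem.Str.strip (String.ofList ((PySem.Str.strip x).toList.drop 11))) with _ | ⟨v, ws⟩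
      · rw [hpw, hwc] at hwords; simp at hwords
      · have hv : v ≠ "" := pv_mem_split₀_ne_empty _ v (by rw [hwc]; exact List.mem_cons_self ..)
        have h1 : PySem.List.pyGet? ["state_hash", String.ofList ((PySem.Str.strip x).toList.drop 11)] (1:Int) =
            some (String.ofList ((PySem.Str.strip x).toList.drop 11)) := by simp [pysem]
        have h0 : PySem.List.pyGet? (v :: ws) (0:Int) = some v := by simp [pysem]
        simp only [h1, hwc, h0, List.getD_cons_succ, List.getD_cons_zero, List.headD_cons]
        simp [hv]
    · have hm' : pvIsHashLine x = false := by simpa using hm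
      have hns : PySem.Str.startswith (PySem.Str.strip x) "state_hash=" = false := hm'
      have hfil : ((ys ++ [x]).filter pvIsHashLine) = ys.filter pvIsHashLine := by
        rw [List.filter_append]; simp [hm']
      have hpre' : Pre_extract_last_state_hash ys := by
        unfold Pre_extract_last_state_hash at hpre ⊢
        rwa [hfil] at hpre
      rw [extract_last_state_hash_go, extract_last_state_hash_alt_step]
      simp only [hns, Bool.false_eq_true, if_false]
      exact ih hpre'


-- ===== VERDICT (by name: the statement is the Claim_ definition above) =====
theorem extract_last_state_hash_spec : Claim_equal_extract_last_state_hash := by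
  intro lines _ hpre
  unfold Spec_extract_last_state_hash extract_last_state_hash extract_last_state_hash_alt
  exact pv_main lines hpre
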